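-- pv_equiv track=rewrite | github.com/RenzoG10/primer-repo-datos-futbol | main.py | detectar_minutos
-- ===== SOURCE A (Python) =====
-- def detectar_minutos(texto):
--     """
--     Extrae los números al final del texto, si los hay, y los retorna.
--     """
--     numeros = ""
--     for car in reversed(texto):  # Recorre el texto desde el final
--         if car.isdigit():  # Si es un número, lo agrega a los minutos
--             numeros = car + numeros
--         else:
--             break  # Sale del bucle si no es un número
--     return numeros
-- ===== SOURCE B (Python) =====
-- def detectar_minutos(texto):
--     """
--     Extrae los números al final del texto, si los hay, y los retorna.
--     """
--     i = len(texto)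
--     while i > 0 and texto[i-1].isdigit():
--         i -= 1
--     return texto[i:]
-- ===== Notes on version B (the rewrite author's own statement) =====
-- stated objective: simpler
-- what changed: Replaces the character-by-character string prepend-accumulation over reversed(texto) with a backward index scan that finds where the trailing digit run starts and returns a single slice texto[i:].
import Mathlib
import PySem

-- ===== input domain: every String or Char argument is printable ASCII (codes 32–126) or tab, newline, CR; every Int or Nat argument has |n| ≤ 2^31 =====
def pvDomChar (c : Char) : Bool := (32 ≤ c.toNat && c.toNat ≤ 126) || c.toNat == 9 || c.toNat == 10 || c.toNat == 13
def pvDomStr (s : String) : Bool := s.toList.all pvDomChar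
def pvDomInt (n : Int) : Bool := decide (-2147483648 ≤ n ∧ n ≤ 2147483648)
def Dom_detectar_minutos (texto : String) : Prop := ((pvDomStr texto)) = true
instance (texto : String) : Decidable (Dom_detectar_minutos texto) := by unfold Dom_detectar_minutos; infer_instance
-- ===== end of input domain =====

-- B replaces A's reversed-iteration string prepend-accumulation with a backward
-- index scan plus a single slice (objective: simpler decomposition).


-- ===== PORT A =====
-- the for-loop with break: numeros accumulates car + numeros while car.isdigit()
def pvALoop (acc : List Char) (rev : List Char) : List Char :=
  match rev with
  | [] => acc
  | c :: rest => if PySem.Chars.isdigit c then pvALoop (c :: acc) rest else acc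

def detectar_minutos (texto : String) : String :=
  String.ofList (pvALoop [] texto.toList.reverse)

-- ===== PORT B =====
-- while i > 0 and texto[i-1].isdigit(): i -= 1
def pvBLoop (l : List Char) (i : Nat) : Nat :=
  if 0 < i ∧ (l[i-1]?.any PySem.Chars.isdigit) then pvBLoop l (i-1) else i
termination_by i
decreasing_by omega

-- return texto[i:]  (0 ≤ i ≤ len, so the slice is List.drop i)
def detectar_minutos_alt (texto : String) : String :=
  String.ofList (List.drop (pvBLoop texto.toList texto.toList.length) texto.toList)

-- ===== PRECONDITION & SPEC =====
def Spec_detectar_minutos (texto : String) (out : String) : Prop := out = detectar_minutos_alt texto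
instance (texto : String) (out : String) : Decidable (Spec_detectar_minutos texto out) := by unfold Spec_detectar_minutos; infer_instance

-- ===== CLAIM (what is proved, stated in full; the proofs are below) =====
def Claim_equal_detectar_minutos : Prop := ∀ (texto : String), Dom_detectar_minutos texto → Spec_detectar_minutos texto (detectar_minutos texto)

-- ===== LEMMAS AND PROOFS =====

theorem pvALoop_eq (rev acc : List Char) :
    pvALoop acc rev = (rev.takeWhile PySem.Chars.isdigit).reverse ++ acc := by
  induction rev generalizing acc with
  | nil => simp [pvALoop]
  | cons c rest ih =>
    by_cases h : PySem.Chars.isdigit c = true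
    · simp [pvALoop, h, ih, List.takeWhile]
    · simp [pvALoop, h, List.takeWhile]

theorem pvBLoop_le (l : List Char) (i : Nat) : pvBLoop l i ≤ i := by
  induction i using Nat.strong_induction_on with
  | _ i ih =>
    rw [pvBLoop]
    split
    · rename_i h
      have := ih (i-1) (by omega)
      omega
    · exact le_refl i

theorem pvBLoop_append (l : List Char) (c : Char) (i : Nat) (hi : i ≤ l.length) :
    pvBLoop (l ++ [c]) i = pvBLoop l i := by
  induction i using Nat.strong_induction_on with
  | _ i ih =>
    rcases Nat.eq_zero_or_pos i with h0 | h0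
    · subst h0
      rw [pvBLoop]
      conv_rhs => rw [pvBLoop]
      simp
    · have hg : (l ++ [c])[i-1]? = l[i-1]? := by
        rw [List.getElem?_append_left (by omega)]
      rw [pvBLoop]
      conv_rhs => rw [pvBLoop]
      rw [hg]
      split
      · rename_i h
        exact ih (i-1) (by omega) (by omega)
      · rfl

theorem pvBLoop_main (l : List Char) :
    List.drop (pvBLoop l l.length) l
      = (l.reverse.takeWhile PySem.Chars.isdigit).reverse := by
  induction l using List.reverseRecOn with
  | nil => simp [pvBLoop]
  | append_singleton l c ih =>
    rw [pvBLoop]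
    simp only [List.length_append, List.length_singleton]
    have hlast : (l ++ [c])[l.length + 1 - 1]? = some c := by
      simp
    by_cases h : PySem.Chars.isdigit c = true
    · rw [if_pos (by simp [h])]
      have : l.length + 1 - 1 = l.length := by omega
      rw [this, pvBLoop_append l c l.length (le_refl _)]
      have hle := pvBLoop_le l l.length
      rw [List.drop_append_of_le_length hle, ih]
      simp [h]
    · rw [if_neg (by simp [h])]
      simp [h]

-- ===== VERDICT (by name: the statement is the Claim_ definition above) =====
theorem detectar_minutos_spec : Claim_equal_detectar_minutos := by
  intro texto _
  unfold Spec_detectar_minutos detectar_minutos detectar_minutos_alt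
  rw [pvALoop_eq, pvBLoop_main]
  simp
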